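-- pv_equiv track=rewrite | github.com/YunhoKim21/MathInterpreter | stringfunctions.py | whereIsString
-- ===== SOURCE A (Python) =====
-- def whereIsString(input, char):
--     value=0
--     for i in range(0, len(input)):
--         if input[i]=="(":
--             value+=1
--         if input[i]==")":
--             value-=1
--         if input[i:i+len(char)]==char and value==0:
--             return i
-- ===== SOURCE B (Python) =====
-- def whereIsString(input, char):
--     # precompute depth-after-each-character once, then let str.find skip
--     # directly between occurrences of char
--     depth = []
--     d = 0
--     for c in input:
--         if c == "(":
--             d += 1
--         elif c == ")":
--             d -= 1
--         depth.append(d)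
--     pos = input.find(char)
--     while 0 <= pos < len(input):
--         if depth[pos] == 0:
--             return pos
--         pos = input.find(char, pos + 1)
--     return None
-- ===== Notes on version B (the rewrite author's own statement) =====
-- stated objective: faster
-- what changed: B precomputes the paren-depth-after-each-character array in one pass and then jumps between occurrences of char with str.find, instead of A's slice-and-compare of char at every single index.
import Mathlib
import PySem

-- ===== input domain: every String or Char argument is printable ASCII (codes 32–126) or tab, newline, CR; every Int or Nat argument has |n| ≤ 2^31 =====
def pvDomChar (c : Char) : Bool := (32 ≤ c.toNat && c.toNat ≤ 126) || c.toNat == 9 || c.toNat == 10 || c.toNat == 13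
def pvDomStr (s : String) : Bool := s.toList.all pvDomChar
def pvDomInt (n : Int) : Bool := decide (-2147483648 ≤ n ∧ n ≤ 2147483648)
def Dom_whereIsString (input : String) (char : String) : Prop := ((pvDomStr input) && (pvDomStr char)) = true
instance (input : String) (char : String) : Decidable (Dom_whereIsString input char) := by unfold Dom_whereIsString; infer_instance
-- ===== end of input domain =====

-- B replaces A's per-index slice comparison by one precomputed depth array plus
-- str.find jumps between occurrences (objective: faster, constant-factor C-level scan).

-- ===== PORT A =====
-- the 'for i in range(0, len(input))' loop with early return, value threaded
def whereIsStringLoopA (cs ch : List Char) : List Int → Int → Option Int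
  | [], _ => none
  | i :: rest, value =>
    let value1 := if PySem.List.pyGetD cs i ' ' = '(' then value + 1 else value
    let value2 := if PySem.List.pyGetD cs i ' ' = ')' then value1 - 1 else value1
    if PySem.List.slice cs (some i) (some (i + (ch.length : Int))) = ch ∧ value2 = 0 then
      some i
    else whereIsStringLoopA cs ch rest value2

def whereIsString (input : String) (char : String) : Option Int :=
  whereIsStringLoopA input.toList char.toList
    (PySem.List.pyRange 0 (input.toList.length : Int) 1) 0

-- ===== PORT B =====
-- depth-after-each-character list, built in one pass (B's first for loop)
def whereIsStringDepths : List Char → Int → List Int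
  | [], _ => []
  | c :: cs, d =>
    let d' := if c = '(' then d + 1 else if c = ')' then d - 1 else d
    d' :: whereIsStringDepths cs d'

-- B's while loop: jump between occurrences with find (fuel only makes the
-- recursion structural; it never runs out while start <= len)
def whereIsStringLoopB (cs : List Char) (dep : List Int) (ch : List Char) :
    Nat → Nat → Option Int
  | 0, _ => none
  | fuel + 1, start =>
    let p := PySem.Chars.findFrom cs ch (start : Int) none
    if 0 ≤ p ∧ p.toNat < cs.length then
      if dep.getD p.toNat 0 = 0 then some p
      else whereIsStringLoopB cs dep ch fuel (p.toNat + 1)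
    else none

def whereIsString_alt (input : String) (char : String) : Option Int :=
  whereIsStringLoopB input.toList (whereIsStringDepths input.toList 0) char.toList
    (input.toList.length + 1) 0

-- ===== PRECONDITION & SPEC =====
def Spec_whereIsString (input : String) (char : String) (out : Option Int) : Prop := out = whereIsString_alt input char
instance (input : String) (char : String) (out : Option Int) : Decidable (Spec_whereIsString input char out) := by unfold Spec_whereIsString; infer_instance

-- ===== CLAIM (what is proved, stated in full; the proofs are below) =====
def Claim_equal_whereIsString : Prop := ∀ (input : String) (char : String), Dom_whereIsString input char → Spec_whereIsString input char (whereIsString input char)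

-- ===== LEMMAS AND PROOFS =====

-- reference: first index j with char-prefix match and depth 0
def wisStep (d : Int) (c : Char) : Int :=
  if c = '(' then d + 1 else if c = ')' then d - 1 else d

def wisSearch (cs ch : List Char) (dep : List Int) (j : Nat) : Option Int :=
  if _h : j < cs.length then
    if ch <+: cs.drop j ∧ dep.getD j 0 = 0 then some (j : Int)
    else wisSearch cs ch dep (j + 1)
  else none
termination_by cs.length - j

lemma wisDepths_getD (cs : List Char) (d : Int) (j : Nat) (hj : j < cs.length) :
    (whereIsStringDepths cs d).getD j 0 = (cs.take (j + 1)).foldl wisStep d := by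
  induction cs generalizing d j with
  | nil => simp at hj
  | cons c cs ih =>
    cases j with
    | zero => simp [whereIsStringDepths, wisStep]
    | succ j =>
      simp only [whereIsStringDepths, List.getD_cons_succ, List.take_succ_cons, List.foldl_cons]
      exact ih _ _ (by simpa using hj)

lemma wisTake_eq_iff (xs ch : List Char) : xs.take ch.length = ch ↔ ch <+: xs := by
  constructor
  · intro h; rw [← h]; exact List.take_prefix _ _
  · intro h; exact (List.prefix_iff_eq_take.mp h).symm

-- A's loop from index j equals the reference search
lemma loopA_eq (cs ch : List Char) (j : Nat) (hj : j ≤ cs.length) :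
    whereIsStringLoopA cs ch (PySem.List.pyRange (j : Int) (cs.length : Int) 1)
        ((cs.take j).foldl wisStep 0)
      = wisSearch cs ch (whereIsStringDepths cs 0) j := by
  have hk : cs.length - j + j = cs.length := by omega
  generalize hfuel : cs.length - j = k at *
  induction k generalizing j with
  | zero =>
    have hge : (cs.length : Int) ≤ (j : Int) := by exact_mod_cast Nat.le_of_sub_eq_zero hfuel
    rw [PySem.List.pyRange_one_eq_nil hge, wisSearch]
    simp [whereIsStringLoopA, show ¬ j < cs.length by omega]
  | succ k ih =>
    have hjlt : j < cs.length := by omega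
    rw [PySem.List.pyRange_one_cons (by exact_mod_cast hjlt), whereIsStringLoopA]
    have hget : PySem.List.pyGetD cs (j : Int) ' ' = cs[j] := by
      simp [PySem.List.pyGetD_natCast, List.getD_eq_getElem?_getD, hjlt]
    have hv2 : (if PySem.List.pyGetD cs (j:Int) ' ' = ')' then
        (if PySem.List.pyGetD cs (j:Int) ' ' = '(' then (cs.take j).foldl wisStep 0 + 1
         else (cs.take j).foldl wisStep 0) - 1
        else (if PySem.List.pyGetD cs (j:Int) ' ' = '(' then (cs.take j).foldl wisStep 0 + 1
         else (cs.take j).foldl wisStep 0))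
        = (cs.take (j+1)).foldl wisStep 0 := by
      rw [hget, List.take_add_one, List.getElem?_eq_getElem hjlt]
      simp only [Option.toList_some, List.foldl_append, List.foldl_cons, List.foldl_nil, wisStep]
      by_cases h1 : cs[j] = '(' <;> by_cases h2 : cs[j] = ')' <;> simp [h1, h2] at *
    have hslice : PySem.List.slice cs (some (j:Int)) (some ((j:Int) + (ch.length:Int))) = ch
        ↔ ch <+: cs.drop j := by
      rw [PySem.List.slice_natCast_add]
      exact wisTake_eq_iff _ _
    have hdep : (whereIsStringDepths cs 0).getD j 0 = (cs.take (j+1)).foldl wisStep 0 :=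
      wisDepths_getD cs 0 j hjlt
    rw [wisSearch]
    simp only [hjlt, dif_pos]
    by_cases hc : ch <+: cs.drop j ∧ (whereIsStringDepths cs 0).getD j 0 = 0
    · rw [if_pos hc]
      rw [if_pos]
      constructor
      · exact hslice.mpr hc.1
      · rw [hv2, ← hdep]; exact hc.2
    · rw [if_neg hc, if_neg]
      · rw [hv2]
        have hcast : ((j : Int) + 1) = ((j + 1 : Nat) : Int) := by push_cast; ring
        rw [hcast]
        exact ih (j+1) (by omega) (by omega) (by omega)
      · intro hcon
        exact hc ⟨hslice.mp hcon.1, by rw [hdep, ← hv2]; exact hcon.2⟩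

-- skipping indices with no match does not change the search result
lemma wisSearch_congr (cs ch : List Char) (dep : List Int) (s t : Nat) (hst : s ≤ t)
    (hno : ∀ i, s ≤ i → i < t → ¬ ch <+: cs.drop i) :
    wisSearch cs ch dep s = wisSearch cs ch dep t := by
  have hk : t - s + s = t := by omega
  generalize hfuel : t - s = k at *
  induction k generalizing s with
  | zero =>
    have : s = t := by omega
    rw [this]
  | succ k ih =>
    have hslt : s < t := by omega
    by_cases hlen : s < cs.length
    · rw [wisSearch]
      simp only [hlen, dif_pos]
      rw [if_neg (fun hcon => hno s le_rfl hslt hcon.1)]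
      exact ih (s+1) (by omega) (fun i h1 h2 => hno i (by omega) h2) (by omega) (by omega)
    · rw [wisSearch, dif_neg hlen, wisSearch, dif_neg (by omega)]

lemma wis_prefix_drop_infix (cs ch : List Char) (s i : Nat) (hsi : s ≤ i)
    (h : ch <+: cs.drop i) : ch <:+: cs.drop s := by
  have : cs.drop i = (cs.drop s).drop (i - s) := by
    rw [List.drop_drop]; congr 1; omega
  rw [this] at h
  exact h.isInfix.trans (List.drop_suffix _ _).isInfix

-- B's loop from index start equals the reference search
lemma loopB_eq (cs ch : List Char) (dep : List Int) (fuel start : Nat)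
    (hs : start ≤ cs.length) (hf : cs.length + 1 ≤ fuel + start) :
    whereIsStringLoopB cs dep ch fuel start = wisSearch cs ch dep start := by
  induction fuel generalizing start with
  | zero => omega
  | succ fuel ih =>
    rw [whereIsStringLoopB]
    by_cases h : 0 ≤ PySem.Chars.findFrom cs ch (start : Int) none ∧
        (PySem.Chars.findFrom cs ch (start : Int) none).toNat < cs.length
    · rw [if_pos h]
      obtain ⟨hle, hpref, hmin⟩ :=
        PySem.Chars.findFrom_natCast_spec cs ch start hs (by omega)
      set p := PySem.Chars.findFrom cs ch (start : Int) none with hp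
      have hcongr := wisSearch_congr cs ch dep start p.toNat (by omega)
        (fun i h1 h2 => hmin i h1 h2)
      rw [hcongr]
      by_cases hd : dep.getD p.toNat 0 = 0
      · rw [if_pos hd, wisSearch]
        simp only [h.2, dif_pos]
        rw [if_pos ⟨hpref, hd⟩]
        congr 1
        omega
      · rw [if_neg hd]
        have hstep : wisSearch cs ch dep p.toNat = wisSearch cs ch dep (p.toNat + 1) := by
          rw [wisSearch]
          simp only [h.2, dif_pos]
          rw [if_neg (fun hc => hd hc.2)]
        rw [hstep]
        exact ih (p.toNat + 1) (by omega) (by omega)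
    · rw [if_neg h]
      by_cases hneg : PySem.Chars.findFrom cs ch (start : Int) none = -1
      · have hnin := (PySem.Chars.findFrom_natCast_eq_neg_one_iff cs ch start hs).mp hneg
        rw [wisSearch_congr cs ch dep start cs.length hs
          (fun i h1 h2 hpref => hnin (wis_prefix_drop_infix cs ch start i h1 hpref))]
        rw [wisSearch, dif_neg (lt_irrefl _)]
      · obtain ⟨hle, hpref, hmin⟩ :=
          PySem.Chars.findFrom_natCast_spec cs ch start hs hneg
        rw [wisSearch_congr cs ch dep start cs.length hs
          (fun i h1 h2 => hmin i h1 (by omega))]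
        rw [wisSearch, dif_neg (lt_irrefl _)]

-- ===== VERDICT (by name: the statement is the Claim_ definition above) =====
theorem whereIsString_spec : Claim_equal_whereIsString := by
  intro input char _
  unfold Spec_whereIsString whereIsString whereIsString_alt
  rw [loopB_eq _ _ _ _ _ (Nat.zero_le _) (by omega)]
  have := loopA_eq input.toList char.toList 0 (Nat.zero_le _)
  simpa using this
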